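-- pv_equiv track=rewrite | github.com/kirillbk/Advent-of-code | 2023/7/solution.py | _get_rank
-- ===== SOURCE A (Python) =====
-- from collections import Counter
--
-- def _get_rank(hand: list[str], joker: bool = False) -> int:
--     first_max = second_max = jokers = 0
--     for card, n in Counter(hand).items():
--         if joker and card == 'J':
--             jokers = n
--             continue
--         if n > first_max:
--             second_max = first_max
--             first_max = n
--         elif n > second_max:
--             second_max = n
--     first_max = first_max + jokers
--
--     if first_max == 5:
--        return 6
--     elif first_max == 4:
--        return 5
--     elif first_max == 3 and second_max == 2:
--        return 4
--     elif first_max == 3: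
--        return 3
--     elif first_max == second_max == 2:
--        return 2
--     elif first_max == 2:
--        return 1
--     return 0
-- ===== SOURCE B (Python) =====
-- from collections import Counter
--
-- def _get_rank(hand: list[str], joker: bool = False) -> int:
--     counts = Counter(hand)
--     jokers = counts.pop('J', 0) if joker else 0
--     top = sorted(counts.values(), reverse=True) + [0, 0]
--     c0 = top[0] + jokers
--     c1 = top[1]
--     if c0 == 5:
--         return 6
--     if c0 == 4:
--         return 5
--     if c0 == 3:
--         return 4 if c1 == 2 else 3
--     if c0 == 2:
--         return 2 if c1 == 2 else 1
--     return 0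
-- ===== Notes on version B (the rewrite author's own statement) =====
-- stated objective: idiomatic
-- what changed: Replaces A's running (first_max, second_max) maxima scan over Counter items by popping the joker count and classifying the top two entries of the descending-sorted count list.
import Mathlib
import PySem

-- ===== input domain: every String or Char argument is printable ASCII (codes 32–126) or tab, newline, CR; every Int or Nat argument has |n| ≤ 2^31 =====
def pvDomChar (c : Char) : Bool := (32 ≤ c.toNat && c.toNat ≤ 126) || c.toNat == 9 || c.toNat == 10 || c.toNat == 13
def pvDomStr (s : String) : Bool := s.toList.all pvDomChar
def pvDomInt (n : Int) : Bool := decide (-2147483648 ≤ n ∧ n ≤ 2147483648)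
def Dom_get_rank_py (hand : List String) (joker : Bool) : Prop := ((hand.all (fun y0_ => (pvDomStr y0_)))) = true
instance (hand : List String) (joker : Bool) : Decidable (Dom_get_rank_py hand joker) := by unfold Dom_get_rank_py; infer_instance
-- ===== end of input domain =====

-- B replaces A's running (first_max, second_max) scan by sorting the non-joker counts
-- descending and classifying the top two entries (objective: idiomatic).

-- ===== PORT A =====
-- A's 'if n > first_max … elif n > second_max' body, as a step on (first_max, second_max)
def top2step (s : Int × Int) (n : Int) : Int × Int :=
  if n > s.1 then (n, s.1) else if n > s.2 then (s.1, n) else s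

def get_rank_py (hand : List String) (joker : Bool) : Int :=
  -- state: ((first_max, second_max), jokers), loop over Counter(hand).items()
  let st := (PySem.Dict.counter hand).items.foldl
    (fun (s : (Int × Int) × Int) kv =>
      if joker && kv.1 == "J" then (s.1, kv.2)
      else (top2step s.1 kv.2, s.2)) ((0, 0), 0)
  let first_max := st.1.1 + st.2
  let second_max := st.1.2
  if first_max = 5 then 6
  else if first_max = 4 then 5
  else if first_max = 3 ∧ second_max = 2 then 4
  else if first_max = 3 then 3
  else if first_max = 2 ∧ second_max = 2 then 2
  else if first_max = 2 then 1
  else 0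

-- ===== PORT B =====
def get_rank_py_alt (hand : List String) (joker : Bool) : Int :=
  let counts := PySem.Dict.counter hand
  let jokers : Int := if joker then counts.getD "J" 0 else 0      -- counts.pop('J', 0)
  let counts := if joker then counts.erase "J" else counts
  let top := PySem.List.sorted counts.values (fun x => x) true ++ [0, 0]
  let c0 := PySem.List.pyGetD top 0 0 + jokers
  let c1 := PySem.List.pyGetD top 1 0
  if c0 = 5 then 6
  else if c0 = 4 then 5
  else if c0 = 3 then (if c1 = 2 then 4 else 3)
  else if c0 = 2 then (if c1 = 2 then 2 else 1)
  else 0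

-- ===== PRECONDITION & SPEC =====
def Spec_get_rank_py (hand : List String) (joker : Bool) (out : Int) : Prop := out = get_rank_py_alt hand joker
instance (hand : List String) (joker : Bool) (out : Int) : Decidable (Spec_get_rank_py hand joker out) := by unfold Spec_get_rank_py; infer_instance

-- ===== CLAIM (what is proved, stated in full; the proofs are below) =====
def Claim_equal_get_rank_py : Prop := ∀ (hand : List String) (joker : Bool), Dom_get_rank_py hand joker → Spec_get_rank_py hand joker (get_rank_py hand joker)

-- ===== LEMMAS AND PROOFS =====

-- A's loop with joker=False is just the top-two fold over all values
theorem foldA_split_false (l : List (String × Int)) (s : Int × Int) (j : Int) :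
    l.foldl (fun (s : (Int × Int) × Int) kv =>
        if false && kv.1 == "J" then (s.1, kv.2)
        else (top2step s.1 kv.2, s.2)) (s, j)
    = ((l.map (·.2)).foldl top2step s, j) := by
  induction l generalizing s with
  | nil => rfl
  | cons kv t ih => simp only [List.foldl_cons, Bool.false_and, Bool.false_eq_true, if_false,
      List.map_cons]; exact ih (top2step s kv.2)

-- A's loop with joker=True splits into the top-two fold over the non-'J' values
-- and the last 'J' value seen
theorem foldA_split_true (l : List (String × Int)) (s : Int × Int) (j : Int) :
    l.foldl (fun (s : (Int × Int) × Int) kv =>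
        if true && kv.1 == "J" then (s.1, kv.2)
        else (top2step s.1 kv.2, s.2)) (s, j)
    = ( ((l.filter (fun kv => !(kv.1 == "J"))).map (·.2)).foldl top2step s,
        ((l.filter (fun kv => kv.1 == "J")).map (·.2)).getLastD j ) := by
  induction l generalizing s j with
  | nil => rfl
  | cons kv t ih =>
    simp only [List.foldl_cons]
    by_cases h : kv.1 = "J"
    · rw [if_pos (by simp [h])]
      rw [ih]
      rw [List.filter_cons_of_neg (by simp [h]), List.filter_cons_of_pos (by simp [h]),
          List.map_cons, List.getLastD_cons]
    · rw [if_neg (by simp [h])]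
      rw [ih]
      rw [List.filter_cons_of_pos (by simp [h]), List.filter_cons_of_neg (by simp [h]),
          List.map_cons, List.foldl_cons]

-- the top-two fold does not change once every element is below the current second max
theorem fold_top2_const (rest : List Int) (s : Int × Int) (h2 : s.2 ≤ s.1)
    (h : ∀ n ∈ rest, n ≤ s.2) : rest.foldl top2step s = s := by
  induction rest with
  | nil => rfl
  | cons a t ih =>
    have ha := h a (by simp)
    have : top2step s a = s := by
      unfold top2step; rw [if_neg (by omega), if_neg (by omega)]
    rw [List.foldl_cons, this]
    exact ih (fun n hn => h n (by simp [hn]))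

theorem top2step_rcomm : RightCommutative top2step := by
  constructor
  intro s a b
  obtain ⟨f, g⟩ := s
  unfold top2step
  split_ifs <;> simp_all <;> omega

-- the fold over any list of positive values computes the first two entries of its descending sort
theorem fold_top2_sorted (vals : List Int) (h1 : ∀ v ∈ vals, 1 ≤ v) :
    vals.foldl top2step (0, 0)
      = (PySem.List.pyGetD (PySem.List.sorted vals (fun x => x) true ++ [0, 0]) 0 0,
         PySem.List.pyGetD (PySem.List.sorted vals (fun x => x) true ++ [0, 0]) 1 0) := by
  have hperm : (PySem.List.sorted vals (fun x => x) true).Perm vals := PySem.List.sorted_perm _ _ _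
  haveI := top2step_rcomm
  rw [← List.Perm.foldl_eq hperm (0, 0)]
  have hmem : ∀ v ∈ PySem.List.sorted vals (fun x => x) true, 1 ≤ v := by
    intro v hv; exact h1 v (hperm.mem_iff.mp hv)
  have hpw : (PySem.List.sorted vals (fun x => x) true).Pairwise (fun a b => b ≤ a) :=
    PySem.List.sorted_pairwise_rev vals (fun x => x)
  set srt := PySem.List.sorted vals (fun x => x) true with hs
  clear_value srt
  match srt, hmem, hpw with
  | [], _, _ => simp [PySem.List.pyGetD_ofNat', List.getD]
  | [a], hm, _ =>
    have ha := hm a (by simp)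
    simp only [List.foldl_cons, List.foldl_nil]
    rw [show top2step (0, 0) a = (a, 0) by unfold top2step; rw [if_pos (by omega)]]
    simp [PySem.List.pyGetD_ofNat', List.getD]
  | a :: b :: rest, hm, hp =>
    have ha := hm a (by simp)
    have hb := hm b (by simp)
    have hba : b ≤ a := (List.pairwise_cons.mp hp).1 b (by simp)
    have hrest : ∀ n ∈ rest, n ≤ b :=
      (List.pairwise_cons.mp (List.pairwise_cons.mp hp).2).1
    simp only [List.foldl_cons]
    rw [show top2step (0, 0) a = (a, 0) by unfold top2step; rw [if_pos (by omega)],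
        show top2step (a, 0) b = (a, b) by unfold top2step; rw [if_neg (by omega), if_pos (by omega)],
        fold_top2_const rest (a, b) hba hrest]
    simp [PySem.List.pyGetD_ofNat', List.getD]

theorem count_eq_one_aux {α : Type} [DecidableEq α] (l : List α) (a : α) (h : l.Nodup)
    (hm : a ∈ l) : l.count a = 1 := by
  induction l with
  | nil => cases hm
  | cons x t ih =>
    rcases List.mem_cons.mp hm with rfl | hmt
    · rw [List.count_cons_self, List.count_eq_zero_of_not_mem (List.nodup_cons.mp h).1]
    · rw [List.count_cons_of_ne (by rintro rfl; exact (List.nodup_cons.mp h).1 hmt) ,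
          ih (List.nodup_cons.mp h).2 hmt]

-- a nodup list filtered to one element
theorem filter_beq_nodup {α : Type} [DecidableEq α] (l : List α) (a : α) (h : l.Nodup) :
    l.filter (· == a) = if a ∈ l then [a] else [] := by
  rw [List.filter_beq]
  by_cases hm : a ∈ l
  · rw [if_pos hm, count_eq_one_aux l a h hm]; rfl
  · rw [if_neg hm, List.count_eq_zero_of_not_mem hm]; rfl

-- every value of Counter(hand) is a positive count
theorem counter_values_pos (hand : List String) :
    ∀ v ∈ (PySem.Dict.counter hand).items.map (·.2), (1 : Int) ≤ v := by
  intro v hv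
  rw [PySem.Dict.items_counter] at hv
  simp only [List.map_map, List.mem_map] at hv
  obtain ⟨k, hk, rfl⟩ := hv
  have : k ∈ hand := (PySem.Set.mem_ofList hand k).mp hk
  have : 0 < hand.count k := List.count_pos_iff.mpr this
  simp only [Function.comp]
  exact_mod_cast this

-- the last 'J' entry A's loop keeps is exactly Counter(hand)['J'] (or 0)
theorem lastJ_eq_getD (hand : List String) :
    ((((PySem.Dict.counter hand).items.filter (fun kv => kv.1 == "J")).map (·.2)).getLastD 0)
      = (PySem.Dict.counter hand).getD "J" 0 := by
  rw [PySem.Dict.items_counter, List.filter_map]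
  have : (PySem.Set.ofList hand).filter ((fun kv : String × Int => kv.1 == "J") ∘
      (fun k => (k, (hand.count k : Int)))) = (PySem.Set.ofList hand).filter (· == "J") := by
    apply List.filter_congr; intro x _; rfl
  rw [this, filter_beq_nodup _ _ (PySem.Set.nodup_ofList hand), PySem.Dict.getD_counter]
  by_cases hm : "J" ∈ hand
  · rw [if_pos ((PySem.Set.mem_ofList hand "J").mpr hm)]; rfl
  · rw [if_neg (fun hc => hm ((PySem.Set.mem_ofList hand "J").mp hc)),
        List.count_eq_zero_of_not_mem hm]; rfl

-- both if-chains compute the same rank from (first_max, second_max)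
theorem chains_eq (fm sm : Int) :
    (if fm = 5 then (6 : Int)
     else if fm = 4 then 5
     else if fm = 3 ∧ sm = 2 then 4
     else if fm = 3 then 3
     else if fm = 2 ∧ sm = 2 then 2
     else if fm = 2 then 1
     else 0)
    = (if fm = 5 then (6 : Int)
       else if fm = 4 then 5
       else if fm = 3 then (if sm = 2 then 4 else 3)
       else if fm = 2 then (if sm = 2 then 2 else 1)
       else 0) := by
  split_ifs <;> first | rfl | omega

-- ===== VERDICT (by name: the statement is the Claim_ definition above) =====
theorem get_rank_py_spec : Claim_equal_get_rank_py := by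
  intro hand joker _
  unfold Spec_get_rank_py
  cases joker with
  | false =>
    simp only [get_rank_py, get_rank_py_alt, foldA_split_false, if_neg (by simp :
      ¬ (false = true))]
    rw [show (PySem.Dict.counter hand).values = (PySem.Dict.counter hand).items.map (·.2) from rfl,
        fold_top2_sorted _ (counter_values_pos hand)]
    exact chains_eq _ _
  | true =>
    simp only [get_rank_py, get_rank_py_alt, foldA_split_true, if_true]
    rw [show (PySem.Dict.erase (PySem.Dict.counter hand) "J").values
          = ((PySem.Dict.counter hand).items.filter (fun kv => !(kv.1 == "J"))).map (·.2) from rfl,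
        lastJ_eq_getD hand]
    rw [fold_top2_sorted _ (by
      intro v hv
      refine counter_values_pos hand v ?_
      simp only [List.mem_map] at hv ⊢
      obtain ⟨kv, hkv, rfl⟩ := hv
      exact ⟨kv, (List.mem_filter.mp hkv).1, rfl⟩)]
    exact chains_eq _ _
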